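-- pv_equiv track=rewrite | github.com/JakobsPortfolio/Shift-Scheduler | scheduler.py | get_consecutive_days_count
-- ===== SOURCE A (Python) =====
-- DAY_ORDER = {
--     "Monday": 0,
--     "Tuesday": 1,
--     "Wednesday": 2,
--     "Thursday": 3,
--     "Friday": 4,
--     "Saturday": 5,
--     "Sunday": 6,
-- }
--
-- def get_consecutive_days_count(emp_id, current_day, worked_days):
--     current_index = DAY_ORDER[current_day]
--     count = 0
--     for i in range(current_index - 1, -1, -1):
--         day_name = next(day for day, idx in DAY_ORDER.items() if idx == i)
--         if day_name in worked_days[emp_id]: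
--             count += 1
--         else:
--             break
--     return count
-- ===== SOURCE B (Python) =====
-- DAY_ORDER = {
--     "Monday": 0,
--     "Tuesday": 1,
--     "Wednesday": 2,
--     "Thursday": 3,
--     "Friday": 4,
--     "Saturday": 5,
--     "Sunday": 6,
-- }
--
-- DAY_NAMES = ["Monday", "Tuesday", "Wednesday", "Thursday", "Friday", "Saturday", "Sunday"]
--
-- def get_consecutive_days_count(emp_id, current_day, worked_days):
--     # forward scan: run of consecutive worked days ending just before current_day
--     run = 0
--     for i in range(DAY_ORDER[current_day]):
--         run = run + 1 if DAY_NAMES[i] in worked_days[emp_id] else 0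
--     return run
-- ===== Notes on version B (the rewrite author's own statement) =====
-- stated objective: simpler
-- what changed: Replaces the backward loop with break and the linear next()-search through DAY_ORDER.items() per iteration by a forward scan over a name list with a reset-on-gap run accumulator and no break.
import Mathlib
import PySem

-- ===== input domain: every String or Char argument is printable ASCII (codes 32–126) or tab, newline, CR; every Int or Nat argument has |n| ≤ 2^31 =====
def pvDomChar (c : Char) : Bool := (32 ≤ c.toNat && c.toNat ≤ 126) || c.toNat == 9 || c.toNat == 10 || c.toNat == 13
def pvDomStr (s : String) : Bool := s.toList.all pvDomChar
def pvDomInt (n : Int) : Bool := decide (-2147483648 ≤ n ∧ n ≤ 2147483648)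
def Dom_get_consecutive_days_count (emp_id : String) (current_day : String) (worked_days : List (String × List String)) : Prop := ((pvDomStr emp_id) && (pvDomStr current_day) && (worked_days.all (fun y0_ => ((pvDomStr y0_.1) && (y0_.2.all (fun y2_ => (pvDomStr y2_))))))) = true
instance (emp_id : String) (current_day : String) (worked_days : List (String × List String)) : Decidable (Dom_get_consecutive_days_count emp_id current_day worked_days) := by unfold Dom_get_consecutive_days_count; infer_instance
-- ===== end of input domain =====

-- B is a simpler forward scan with a reset-on-gap run accumulator (no break, no
-- per-step linear search through DAY_ORDER.items()); return value proved equal to A's.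

-- ===== PORT A =====
-- DAY_ORDER module constant
def pvDayOrder : PySem.Dict String Int :=
  PySem.Dict.ofList [("Monday", 0), ("Tuesday", 1), ("Wednesday", 2), ("Thursday", 3),
                     ("Friday", 4), ("Saturday", 5), ("Sunday", 6)]

-- the for-loop of A: iterates the range list, `break` returns the current count
def pvALoop (emp_id : String) (worked_days : List (String × List String)) :
    List Int → Int → Int
  | [], count => count
  | i :: rest, count =>
    -- next(day for day, idx in DAY_ORDER.items() if idx == i); Pre_ guarantees it exists
    let day_name := ((pvDayOrder.items.find? (fun p => p.2 == i)).map Prod.fst).getD ""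
    if (((PySem.Dict.mk worked_days).get? emp_id).getD []).contains day_name then
      pvALoop emp_id worked_days rest (count + 1)
    else count

def get_consecutive_days_count (emp_id : String) (current_day : String)
    (worked_days : List (String × List String)) : Int :=
  -- DAY_ORDER[current_day]; Pre_ guarantees the key is present
  let current_index := (pvDayOrder.get? current_day).getD 0
  pvALoop emp_id worked_days (PySem.List.pyRange (current_index - 1) (-1) (-1)) 0

-- ===== PORT B =====
def pvDayNames : List String :=
  ["Monday", "Tuesday", "Wednesday", "Thursday", "Friday", "Saturday", "Sunday"]

def get_consecutive_days_count_alt (emp_id : String) (current_day : String)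
    (worked_days : List (String × List String)) : Int :=
  (PySem.List.pyRange 0 ((pvDayOrder.get? current_day).getD 0) 1).foldl
    (fun run i =>
      if (((PySem.Dict.mk worked_days).get? emp_id).getD []).contains
          ((PySem.List.pyGet? pvDayNames i).getD "") then run + 1 else 0) 0

-- ===== PRECONDITION & SPEC =====
-- Pre_ excludes exactly the inputs on which A raises KeyError: current_day not a
-- weekday name, or (when at least one prior day exists, i.e. current_day ≠ "Monday")
-- emp_id missing from worked_days.  B raises the same KeyErrors there.
def Pre_get_consecutive_days_count (emp_id : String) (current_day : String) (worked_days : List (String × List String)) : Prop :=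
  current_day ∈ ["Monday", "Tuesday", "Wednesday", "Thursday", "Friday", "Saturday", "Sunday"] ∧
  (current_day ≠ "Monday" → emp_id ∈ worked_days.map Prod.fst)
instance (emp_id : String) (current_day : String) (worked_days : List (String × List String)) : Decidable (Pre_get_consecutive_days_count emp_id current_day worked_days) := by unfold Pre_get_consecutive_days_count; infer_instance

def pvWitness_get_consecutive_days_count : String × String × (List (String × List String)) :=
  ("e", "Friday", [("e", ["Wednesday", "Thursday"])])

def Spec_get_consecutive_days_count (emp_id : String) (current_day : String) (worked_days : List (String × List String)) (out : Int) : Prop := out = get_consecutive_days_count_alt emp_id current_day worked_days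
instance (emp_id : String) (current_day : String) (worked_days : List (String × List String)) (out : Int) : Decidable (Spec_get_consecutive_days_count emp_id current_day worked_days out) := by unfold Spec_get_consecutive_days_count; infer_instance

-- ===== CLAIM (what is proved, stated in full; the proofs are below) =====
def Claim_equal_get_consecutive_days_count : Prop := ∀ (emp_id : String) (current_day : String) (worked_days : List (String × List String)), Dom_get_consecutive_days_count emp_id current_day worked_days → Pre_get_consecutive_days_count emp_id current_day worked_days → Spec_get_consecutive_days_count emp_id current_day worked_days (get_consecutive_days_count emp_id current_day worked_days)

-- ===== LEMMAS AND PROOFS =====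
lemma pvOrder_Monday : pvDayOrder.get? "Monday" = some 0 := by decide
lemma pvOrder_Tuesday : pvDayOrder.get? "Tuesday" = some 1 := by decide
lemma pvOrder_Wednesday : pvDayOrder.get? "Wednesday" = some 2 := by decide
lemma pvOrder_Thursday : pvDayOrder.get? "Thursday" = some 3 := by decide
lemma pvOrder_Friday : pvDayOrder.get? "Friday" = some 4 := by decide
lemma pvOrder_Saturday : pvDayOrder.get? "Saturday" = some 5 := by decide
lemma pvOrder_Sunday : pvDayOrder.get? "Sunday" = some 6 := by decide
lemma pvFind_0 : ((pvDayOrder.items.find? (fun p => p.2 == (0 : Int))).map Prod.fst).getD "" = "Monday" := by decide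
lemma pvName_0 : (PySem.List.pyGet? pvDayNames (0 : Int)).getD "" = "Monday" := by decide
lemma pvFind_1 : ((pvDayOrder.items.find? (fun p => p.2 == (1 : Int))).map Prod.fst).getD "" = "Tuesday" := by decide
lemma pvName_1 : (PySem.List.pyGet? pvDayNames (1 : Int)).getD "" = "Tuesday" := by decide
lemma pvFind_2 : ((pvDayOrder.items.find? (fun p => p.2 == (2 : Int))).map Prod.fst).getD "" = "Wednesday" := by decide
lemma pvName_2 : (PySem.List.pyGet? pvDayNames (2 : Int)).getD "" = "Wednesday" := by decide
lemma pvFind_3 : ((pvDayOrder.items.find? (fun p => p.2 == (3 : Int))).map Prod.fst).getD "" = "Thursday" := by decide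
lemma pvName_3 : (PySem.List.pyGet? pvDayNames (3 : Int)).getD "" = "Thursday" := by decide
lemma pvFind_4 : ((pvDayOrder.items.find? (fun p => p.2 == (4 : Int))).map Prod.fst).getD "" = "Friday" := by decide
lemma pvName_4 : (PySem.List.pyGet? pvDayNames (4 : Int)).getD "" = "Friday" := by decide
lemma pvFind_5 : ((pvDayOrder.items.find? (fun p => p.2 == (5 : Int))).map Prod.fst).getD "" = "Saturday" := by decide
lemma pvName_5 : (PySem.List.pyGet? pvDayNames (5 : Int)).getD "" = "Saturday" := by decide
lemma pvDown_0 : PySem.List.pyRange ((-1) : Int) (-1) (-1) = [] := by decide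
lemma pvUp_0 : PySem.List.pyRange 0 (0 : Int) 1 = [] := by decide
lemma pvDown_1 : PySem.List.pyRange (0 : Int) (-1) (-1) = [0] := by decide
lemma pvUp_1 : PySem.List.pyRange 0 (1 : Int) 1 = [0] := by decide
lemma pvDown_2 : PySem.List.pyRange (1 : Int) (-1) (-1) = [1, 0] := by decide
lemma pvUp_2 : PySem.List.pyRange 0 (2 : Int) 1 = [0, 1] := by decide
lemma pvDown_3 : PySem.List.pyRange (2 : Int) (-1) (-1) = [2, 1, 0] := by decide
lemma pvUp_3 : PySem.List.pyRange 0 (3 : Int) 1 = [0, 1, 2] := by decide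
lemma pvDown_4 : PySem.List.pyRange (3 : Int) (-1) (-1) = [3, 2, 1, 0] := by decide
lemma pvUp_4 : PySem.List.pyRange 0 (4 : Int) 1 = [0, 1, 2, 3] := by decide
lemma pvDown_5 : PySem.List.pyRange (4 : Int) (-1) (-1) = [4, 3, 2, 1, 0] := by decide
lemma pvUp_5 : PySem.List.pyRange 0 (5 : Int) 1 = [0, 1, 2, 3, 4] := by decide
lemma pvDown_6 : PySem.List.pyRange (5 : Int) (-1) (-1) = [5, 4, 3, 2, 1, 0] := by decide
lemma pvUp_6 : PySem.List.pyRange 0 (6 : Int) 1 = [0, 1, 2, 3, 4, 5] := by decide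

-- ===== VERDICT (by name: the statement is the Claim_ definition above) =====
theorem get_consecutive_days_count_spec : Claim_equal_get_consecutive_days_count := by
  intro emp_id current_day worked_days _ hpre
  unfold Spec_get_consecutive_days_count
  obtain ⟨hday, -⟩ := hpre
  simp only [List.mem_cons, List.not_mem_nil, or_false] at hday
  rcases hday with rfl | rfl | rfl | rfl | rfl | rfl | rfl <;>
    · simp only [get_consecutive_days_count, get_consecutive_days_count_alt]
      norm_num [pvALoop, List.foldl, pvOrder_Monday, pvOrder_Tuesday, pvOrder_Wednesday, pvOrder_Thursday, pvOrder_Friday, pvOrder_Saturday, pvOrder_Sunday, pvFind_0, pvFind_1, pvFind_2, pvFind_3, pvFind_4, pvFind_5, pvName_0, pvName_1, pvName_2, pvName_3, pvName_4, pvName_5, pvDown_0, pvDown_1, pvDown_2, pvDown_3, pvDown_4, pvDown_5, pvDown_6, pvUp_0, pvUp_1, pvUp_2, pvUp_3, pvUp_4, pvUp_5, pvUp_6]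
      try (split_ifs <;> omega)
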